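-- pv_equiv track=rewrite | github.com/winsy17/Sympathetic_Lie_Algebras | submodule_generation.py | get_fixed_weight
-- ===== SOURCE A (Python) =====
-- def get_fixed_weight(n,m,k,space):
--     '''Input:
--     integers - n, m, k, n<=m
--     string - space: 'tensor', 'symmetric power', 'exterior power'.
--     Output: A list of indices (i,j) such that (e_i,f_j)
--     is an element of weight k. This is calculated using the representation rho(H)'''
--     if (n+m-k)%2 != 0:
--         raise ValueError('There are no elements with weight '+ str(k) + ' in the tensor product of V_' +str(n)+ ' with V_' +str(m))
--     if space in ['symmetric power', 'exterior power'] and n != m: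
--         raise ValueError('Expected n = m for exterior/symmetric power')
--     extra = 0
--     c = 0
--     a = int((n+m-k)/2)
--     if space != 'tensor':
--         c = 1
--         if space == 'exterior power':
--             extra = 1
--     return([(i,a-i) for i in range(n+1) if (c*i+extra)<= a-i <= m])
-- ===== SOURCE B (Python) =====
-- def get_fixed_weight(n,m,k,space):
--     '''Closed-form interval instead of filtering range(n+1).'''
--     if (n+m-k)%2 != 0:
--         raise ValueError('There are no elements with weight '+ str(k) + ' in the tensor product of V_' +str(n)+ ' with V_' +str(m))
--     if space in ['symmetric power', 'exterior power'] and n != m: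
--         raise ValueError('Expected n = m for exterior/symmetric power')
--     extra = 1 if space == 'exterior power' else 0
--     c = 0 if space == 'tensor' else 1
--     a = (n+m-k)//2
--     lo = max(0, a - m)
--     hi = min(n, (a - extra)//(c+1))
--     return [(i, a-i) for i in range(lo, hi+1)]
-- ===== Notes on version B (the rewrite author's own statement) =====
-- stated objective: alternative
-- what changed: B solves the filter inequalities for i in closed form (lo = max(0, a-m), hi = min(n, (a-extra)//(c+1))) and sweeps only that interval with no per-element test, instead of filtering every i in range(n+1).
import Mathlib
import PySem

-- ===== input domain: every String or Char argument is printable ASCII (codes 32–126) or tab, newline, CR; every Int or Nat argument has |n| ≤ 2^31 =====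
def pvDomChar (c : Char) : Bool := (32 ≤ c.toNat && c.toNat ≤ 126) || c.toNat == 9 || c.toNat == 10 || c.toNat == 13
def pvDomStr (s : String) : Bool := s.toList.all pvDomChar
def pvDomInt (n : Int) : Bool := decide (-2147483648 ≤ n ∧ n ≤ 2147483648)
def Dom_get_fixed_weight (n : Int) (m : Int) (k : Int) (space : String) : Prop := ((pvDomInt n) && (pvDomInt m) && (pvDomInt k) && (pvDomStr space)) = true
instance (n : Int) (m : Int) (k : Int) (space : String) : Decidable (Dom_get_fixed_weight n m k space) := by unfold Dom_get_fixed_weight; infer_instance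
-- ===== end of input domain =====

-- B derives the valid index interval [lo, hi] arithmetically and sweeps only it; same return value as A on Pre_ (objective: alternative).

-- ===== PORT A =====
def get_fixed_weight (n : Int) (m : Int) (k : Int) (space : String) : List (Int × Int) :=
  let extra : Int := 0
  let c : Int := 0
  -- int((n+m-k)/2): exact here, since Pre_ guarantees the numerator is even
  let a : Int := (n + m - k) / 2
  let c : Int := if space ≠ "tensor" then 1 else c
  let extra : Int := if space ≠ "tensor" ∧ space = "exterior power" then 1 else extra
  ((PySem.List.pyRange 0 (n + 1) 1).filter
      (fun i => decide (c * i + extra ≤ a - i ∧ a - i ≤ m))).map (fun i => (i, a - i))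

-- ===== PORT B =====
def get_fixed_weight_alt (n : Int) (m : Int) (k : Int) (space : String) : List (Int × Int) :=
  let extra : Int := if space = "exterior power" then 1 else 0
  let c : Int := if space = "tensor" then 0 else 1
  let a : Int := PySem.Int.floordiv (n + m - k) 2
  let lo : Int := max 0 (a - m)
  let hi : Int := min n (PySem.Int.floordiv (a - extra) (c + 1))
  (PySem.List.pyRange lo (hi + 1) 1).map (fun i => (i, a - i))

-- ===== PRECONDITION & SPEC =====
-- Pre_ excludes exactly the inputs where A raises ValueError: odd n+m-k, or a symmetric/exterior power with n ≠ m.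
def Pre_get_fixed_weight (n : Int) (m : Int) (k : Int) (space : String) : Prop :=
  (n + m - k) % 2 = 0 ∧ ((space = "symmetric power" ∨ space = "exterior power") → n = m)
instance (n : Int) (m : Int) (k : Int) (space : String) : Decidable (Pre_get_fixed_weight n m k space) := by unfold Pre_get_fixed_weight; infer_instance
def pvWitness_get_fixed_weight : Int × Int × Int × String := (2, 3, 1, "tensor")

def Spec_get_fixed_weight (n : Int) (m : Int) (k : Int) (space : String) (out : List (Int × Int)) : Prop := out = get_fixed_weight_alt n m k space
instance (n : Int) (m : Int) (k : Int) (space : String) (out : List (Int × Int)) : Decidable (Spec_get_fixed_weight n m k space out) := by unfold Spec_get_fixed_weight; infer_instance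

-- ===== CLAIM (what is proved, stated in full; the proofs are below) =====
def Claim_equal_get_fixed_weight : Prop := ∀ (n : Int) (m : Int) (k : Int) (space : String), Dom_get_fixed_weight n m k space → Pre_get_fixed_weight n m k space → Spec_get_fixed_weight n m k space (get_fixed_weight n m k space)

-- ===== LEMMAS AND PROOFS =====

-- Filtering an interval predicate out of a unit-step range yields the clipped range.
lemma filter_pyRange_interval (lo hi : Int) : ∀ (N : Nat) (s e : Int), (e - s).toNat = N →
    (PySem.List.pyRange s e 1).filter (fun i => decide (lo ≤ i ∧ i ≤ hi)) =
      PySem.List.pyRange (max s lo) (min e (hi + 1)) 1 := by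
  intro N
  induction N with
  | zero =>
    intro s e h
    rw [show PySem.List.pyRange s e 1 = [] from PySem.List.pyRange_one_eq_nil (by omega),
      show PySem.List.pyRange (max s lo) (min e (hi + 1)) 1 = [] from
        PySem.List.pyRange_one_eq_nil (by omega)]
    rfl
  | succ N ih =>
    intro s e h
    rw [PySem.List.pyRange_one_cons (show s < e by omega), List.filter_cons]
    by_cases hin : lo ≤ s ∧ s ≤ hi
    · rw [if_pos (by simpa using hin), ih (s + 1) e (by omega),
        show max (s + 1) lo = s + 1 by omega,
        show max s lo = s by omega,
        PySem.List.pyRange_one_cons (show s < min e (hi + 1) by omega)]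
    · rw [if_neg (by simpa using hin), ih (s + 1) e (by omega)]
      by_cases hlo : lo ≤ s
      · rw [show PySem.List.pyRange (max (s + 1) lo) (min e (hi + 1)) 1 = [] from
          PySem.List.pyRange_one_eq_nil (by omega),
          show PySem.List.pyRange (max s lo) (min e (hi + 1)) 1 = [] from
          PySem.List.pyRange_one_eq_nil (by omega)]
      · rw [show max (s + 1) lo = max s lo by omega]

-- The core step: A's filtered sweep of range(n+1) equals B's clipped interval sweep.
lemma core_interval (n m a extra c : Int) (hc : c = 0 ∨ c = 1) :
    ((PySem.List.pyRange 0 (n + 1) 1).filter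
        (fun i => decide (c * i + extra ≤ a - i ∧ a - i ≤ m))).map (fun i => (i, a - i)) =
      (PySem.List.pyRange (max 0 (a - m))
        (min n (PySem.Int.floordiv (a - extra) (c + 1)) + 1) 1).map (fun i => (i, a - i)) := by
  have hpos : (0 : Int) < c + 1 := by rcases hc with rfl | rfl <;> norm_num
  rw [PySem.Int.floordiv_eq_ediv_of_pos hpos]
  have hpred : (fun i : Int => decide (c * i + extra ≤ a - i ∧ a - i ≤ m)) =
      (fun i : Int => decide (a - m ≤ i ∧ i ≤ (a - extra) / (c + 1))) := by
    funext i
    rw [decide_eq_decide]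
    rcases hc with rfl | rfl <;> omega
  rw [hpred, filter_pyRange_interval (a - m) ((a - extra) / (c + 1)) ((n + 1) - 0).toNat 0 (n + 1) rfl,
    show min (n + 1) ((a - extra) / (c + 1) + 1) = min n ((a - extra) / (c + 1)) + 1 by omega]

-- ===== VERDICT (by name: the statement is the Claim_ definition above) =====
theorem get_fixed_weight_spec : Claim_equal_get_fixed_weight := by
  intro n m k space _ hpre
  obtain ⟨hpar, _⟩ := hpre
  unfold Spec_get_fixed_weight get_fixed_weight get_fixed_weight_alt
  have ha : (n + m - k) / 2 = PySem.Int.floordiv (n + m - k) 2 := by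
    rw [PySem.Int.floordiv_eq_ediv_of_pos (by norm_num : (0:Int) < 2)]
  by_cases ht : space = "tensor"
  · subst ht
    simp only [ne_eq, not_true_eq_false, if_false, false_and,
      if_neg (by decide : ¬("tensor" = "exterior power")), ha]
    exact core_interval n m _ 0 0 (Or.inl rfl)
  · by_cases he : space = "exterior power"
    · subst he
      simp only [ne_eq, if_neg (by decide : ¬("exterior power" = "tensor")), if_true, ha]
      exact core_interval n m _ 1 1 (Or.inr rfl)
    · simp only [ne_eq, ht, not_false_eq_true, if_true, he, if_false, and_false, ha]
      exact core_interval n m _ 0 1 (Or.inr rfl)
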